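-- pv_equiv track=rewrite | github.com/pytorch/executorch | devtools/inspector/_inspector_utils.py | merge_runtime_overlapping_debug_handles
-- ===== SOURCE A (Python) =====
-- from typing import Any, Dict, IO, List, Mapping, Optional, Tuple, TypeAlias, Union
--
-- DebugHandle: TypeAlias = Tuple[int, ...]
--
-- def _merge_runtime_debug_handles(
--     debug_handle1: DebugHandle, debug_handle2: DebugHandle
-- ) -> DebugHandle:
--     """
--     Merge two DebugHandles by removing elements from debug_handle1 that are also present in debug_handle2,
--     while preserving the relative order of elements in both modified debug_handle1 and debug_handle2.
--     All elements from the modified debug_handle1 will appear before any elements from debug_handle2.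
--     Also removes duplicates within debug_handle2.
--     """
--
--     # Initialize a list to store unique elements in order
--     unique_ordered_list = []
--
--     # Initialize a set to track elements that have already been seen
--     seen = set(debug_handle2)
--
--     for item in debug_handle1:
--         # If the element has not been seen before, add it to the list and mark it as seen
--         if item not in seen:
--             unique_ordered_list.append(item)
--     seen = set(unique_ordered_list)
--     for item in debug_handle2:
--         if item not in seen:
--             unique_ordered_list.append(item)
--             seen.add(item)
--     return tuple(unique_ordered_list)
--
-- def merge_runtime_overlapping_debug_handles(
--     runtime_intermediate_outputs: Dict[DebugHandle, Tuple[int, Any]]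
-- ) -> Dict[DebugHandle, Tuple[int, Any]]:
--     """
--     Merges runtimes with overlapping debug handles into a single key in the dict.
--
--     For each debug handle, this function checks for overlaps with existing keys.
--     If overlaps are found, it combines the overlapping keys into a single key by taking
--     the union of their elements while maintaining the order. The order is preserved such that
--     higher instruction_id appears after the debug_handle with lower instruction_id.
--
--     The value associated with the merged key is determined by the debug handle with the highest instruction id.
--     """
--     if len(runtime_intermediate_outputs) == 0:
--         return {}
--     merged: Dict[DebugHandle, Tuple[int, Any]] = {}
--     for debug_handle, (
--         instruction_id,
--         debug_data,
--     ) in runtime_intermediate_outputs.items():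
--         curr_debug_handle, last_value = debug_handle, (instruction_id, debug_data)
--         # Collect any existing keys that overlap with the current key
--         to_remove = []
--         for existing_debug_handle, existing_value in merged.items():
--             if set(debug_handle) & set(existing_debug_handle):
--                 # Keep the value with the highest instruction_id
--                 # Also merge the debug handles higher instruction_id
--                 if existing_value[0] < instruction_id:
--                     curr_debug_handle = _merge_runtime_debug_handles(
--                         existing_debug_handle, curr_debug_handle
--                     )
--                 else:
--                     curr_debug_handle = _merge_runtime_debug_handles(
--                         curr_debug_handle, existing_debug_handle
--                     )
--                     last_value = existing_value
--                 to_remove.append(existing_debug_handle)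
--         # Remove all the keys that overlap with the current key
--         for debug_handle in to_remove:
--             merged.pop(debug_handle)
--         # Add the current key to the merged one
--         merged[curr_debug_handle] = last_value
--     return merged
-- ===== SOURCE B (Python) =====
-- def _merge_handles_b(a, b):
--     # elements of a not occurring in b, then b deduplicated
--     sb = set(b)
--     out = [x for x in a if x not in sb]
--     seen = set(out)
--     for x in b:
--         if x not in seen:
--             out.append(x)
--             seen.add(x)
--     return tuple(out)
--
--
-- def merge_runtime_overlapping_debug_handles(runtime_intermediate_outputs):
--     # groups: gid -> (debug_handle, value); gids issued in increasing order, so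
--     # iterating sorted gids visits groups in dict-insertion order.
--     # index: element -> gid of the (unique) group whose handle contains it.
--     groups = {}
--     index = {}
--     next_gid = 0
--     for debug_handle, value in runtime_intermediate_outputs.items():
--         hit = set()
--         for e in debug_handle:
--             g = index.get(e)
--             if g is not None:
--                 hit.add(g)
--         key, val = debug_handle, value
--         for g in sorted(hit):
--             k2, v2 = groups.pop(g)
--             if v2[0] < value[0]:
--                 key = _merge_handles_b(k2, key)
--             else:
--                 key = _merge_handles_b(key, k2)
--                 val = v2
--         groups[next_gid] = (key, val)
--         for e in key:
--             index[e] = next_gid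
--         next_gid += 1
--     return dict(groups.values())
-- ===== Notes on version B (the rewrite author's own statement) =====
-- stated objective: alternative
-- what changed: B replaces A's per-entry rescan of every merged key (rebuilding each key's element set) with an element-to-group index plus monotonically increasing group ids: only the groups actually sharing an element with the new handle are looked up, and sorting the hit ids reproduces dict-insertion order.
import Mathlib
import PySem

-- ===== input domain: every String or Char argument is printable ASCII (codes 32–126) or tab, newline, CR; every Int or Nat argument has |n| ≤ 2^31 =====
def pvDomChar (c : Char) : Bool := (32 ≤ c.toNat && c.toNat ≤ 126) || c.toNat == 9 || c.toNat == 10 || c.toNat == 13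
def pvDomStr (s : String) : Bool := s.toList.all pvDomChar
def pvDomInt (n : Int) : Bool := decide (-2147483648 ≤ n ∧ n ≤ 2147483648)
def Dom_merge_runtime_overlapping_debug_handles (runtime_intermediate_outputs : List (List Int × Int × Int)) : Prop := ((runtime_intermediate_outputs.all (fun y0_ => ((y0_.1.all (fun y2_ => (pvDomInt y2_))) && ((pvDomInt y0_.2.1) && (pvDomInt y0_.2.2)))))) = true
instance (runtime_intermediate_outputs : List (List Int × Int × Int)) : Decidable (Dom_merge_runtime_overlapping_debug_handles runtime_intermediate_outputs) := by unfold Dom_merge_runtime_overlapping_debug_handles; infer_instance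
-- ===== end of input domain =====

-- B replaces A's per-entry rescan of all merged keys by an element→group index with
-- increasing group ids (sorted hit ids reproduce dict-insertion order); objective: alternative.
-- The dict argument/result are modelled as insertion-ordered association lists (PySem.Dict items).

-- ===== PORT A =====

-- truthiness of `set(debug_handle) & set(existing_debug_handle)`
def pvOverlap (dh k : List Int) : Bool :=
  !(PySem.Set.inter (PySem.Set.ofList dh) (PySem.Set.ofList k)).isEmpty

-- _merge_runtime_debug_handles
def pvMergeHandles (debug_handle1 debug_handle2 : List Int) : List Int :=
  let seen : PySem.Set Int := PySem.Set.ofList debug_handle2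
  let unique := debug_handle1.foldl
    (fun u item => if PySem.Set.contains seen item then u else u ++ [item]) ([] : List Int)
  let st := debug_handle2.foldl
    (fun (p : List Int × PySem.Set Int) item =>
      if PySem.Set.contains p.2 item then p else (p.1 ++ [item], PySem.Set.add p.2 item))
    (unique, PySem.Set.ofList unique)
  st.1

-- body of A's outer `for` loop (merged is the accumulator dict)
def pvStepA (merged : PySem.Dict (List Int) (Int × Int)) (entry : List Int × Int × Int) :
    PySem.Dict (List Int) (Int × Int) :=
  let debug_handle := entry.1
  let instruction_id := entry.2.1
  -- inner scan: accumulate (curr_debug_handle, last_value) and to_remove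
  let st := merged.items.foldl
    (fun (st : (List Int × (Int × Int)) × List (List Int)) ex =>
      if pvOverlap debug_handle ex.1 then
        (if ex.2.1 < instruction_id then
          ((pvMergeHandles ex.1 st.1.1, st.1.2), st.2 ++ [ex.1])
        else
          ((pvMergeHandles st.1.1 ex.1, ex.2), st.2 ++ [ex.1]))
      else st)
    ((debug_handle, entry.2), ([] : List (List Int)))
  -- `merged.pop(k)`: every k in to_remove is a key of merged, so the getD default is never used
  let merged2 := st.2.foldl (fun m k => (((m.pop? k).map (·.2)).getD m)) merged
  merged2.insert st.1.1 st.1.2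

def merge_runtime_overlapping_debug_handles (runtime_intermediate_outputs : List (List Int × Int × Int)) : List (List Int × Int × Int) :=
  let d := PySem.Dict.ofList runtime_intermediate_outputs
  if d.size = 0 then []
  else (d.items.foldl pvStepA PySem.Dict.empty).items

-- ===== PORT B =====

-- _merge_handles_b: a-elements not in b (comprehension), then b deduplicated
def pvMergeHandlesAlt (a b : List Int) : List Int :=
  let sb : PySem.Set Int := PySem.Set.ofList b
  let out := a.filter (fun x => !(PySem.Set.contains sb x))
  let st := b.foldl
    (fun (p : List Int × PySem.Set Int) x =>
      if PySem.Set.contains p.2 x then p else (p.1 ++ [x], PySem.Set.add p.2 x))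
    (out, PySem.Set.ofList out)
  st.1

-- body of B's outer loop; state = (groups : gid → (handle, value), index : element → gid, next_gid)
def pvStepB (st : PySem.Dict Int (List Int × (Int × Int)) × PySem.Dict Int Int × Int)
    (entry : List Int × Int × Int) :
    PySem.Dict Int (List Int × (Int × Int)) × PySem.Dict Int Int × Int :=
  let groups := st.1
  let index := st.2.1
  let next := st.2.2
  let hit := entry.1.foldl
    (fun (h : PySem.Set Int) e =>
      match index.get? e with
      | some g => PySem.Set.add h g
      | none => h) ([] : PySem.Set Int)
  -- pop each hit group in increasing-gid (= insertion) order and absorb it;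
  -- every hit gid is a key of groups, so the `none` branch is never taken
  let m := (PySem.List.sorted hit id).foldl
    (fun (p : (List Int × (Int × Int)) × PySem.Dict Int (List Int × (Int × Int))) g =>
      match p.2.pop? g with
      | some (kv, rest) =>
        (if kv.2.1 < entry.2.1 then
          ((pvMergeHandlesAlt kv.1 p.1.1, p.1.2), rest)
        else
          ((pvMergeHandlesAlt p.1.1 kv.1, kv.2), rest))
      | none => p)
    ((entry.1, entry.2), groups)
  let groups2 := m.2.insert next m.1
  let index2 := m.1.1.foldl (fun ix e => ix.insert e next) index
  (groups2, index2, next + 1)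

def merge_runtime_overlapping_debug_handles_alt (runtime_intermediate_outputs : List (List Int × Int × Int)) : List (List Int × Int × Int) :=
  let d := PySem.Dict.ofList runtime_intermediate_outputs
  let fin := d.items.foldl pvStepB (PySem.Dict.empty, PySem.Dict.empty, 0)
  (PySem.Dict.ofList fin.1.values).items

-- ===== PRECONDITION & SPEC =====
def Spec_merge_runtime_overlapping_debug_handles (runtime_intermediate_outputs : List (List Int × Int × Int)) (out : List (List Int × Int × Int)) : Prop := out = merge_runtime_overlapping_debug_handles_alt runtime_intermediate_outputs
instance (runtime_intermediate_outputs : List (List Int × Int × Int)) (out : List (List Int × Int × Int)) : Decidable (Spec_merge_runtime_overlapping_debug_handles runtime_intermediate_outputs out) := by unfold Spec_merge_runtime_overlapping_debug_handles; infer_instance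

-- ===== CLAIM (what is proved, stated in full; the proofs are below) =====
def Claim_equal_merge_runtime_overlapping_debug_handles : Prop := ∀ (runtime_intermediate_outputs : List (List Int × Int × Int)), Dom_merge_runtime_overlapping_debug_handles runtime_intermediate_outputs → Spec_merge_runtime_overlapping_debug_handles runtime_intermediate_outputs (merge_runtime_overlapping_debug_handles runtime_intermediate_outputs)

-- ===== LEMMAS AND PROOFS =====

-- -------- small abbreviations used only by the proofs --------

def pvAbsorbA (iid : Int) (p kv : List Int × (Int × Int)) : List Int × (Int × Int) :=
  if kv.2.1 < iid then (pvMergeHandles kv.1 p.1, p.2) else (pvMergeHandles p.1 kv.1, kv.2)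

def pvAbsorbB (iid : Int) (p kv : List Int × (Int × Int)) : List Int × (Int × Int) :=
  if kv.2.1 < iid then (pvMergeHandlesAlt kv.1 p.1, p.2) else (pvMergeHandlesAlt p.1 kv.1, kv.2)

-- the invariant tying A's merged dict to B's (groups, index, next_gid) state
def pvInv (prKeys : List (List Int)) (merged : PySem.Dict (List Int) (Int × Int))
    (st : PySem.Dict Int (List Int × (Int × Int)) × PySem.Dict Int Int × Int) : Prop :=
  merged.items = st.1.values
  ∧ List.Pairwise (· < ·) st.1.keys
  ∧ (∀ g ∈ st.1.keys, g < st.2.2)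
  ∧ (∀ e g, st.2.1.get? e = some g ↔ ∃ kv ∈ st.1.items, kv.1 = g ∧ e ∈ kv.2.1)
  ∧ merged.keys.Nodup
  ∧ List.Pairwise (fun kv kv' => ∀ x, x ∈ kv.1 → x ∉ kv'.1) merged.items
  ∧ (∀ x, (∃ kv ∈ merged.items, x ∈ kv.1) ↔ (∃ k ∈ prKeys, x ∈ k))
  ∧ (∀ kv ∈ merged.items, kv.1 = [] → [] ∈ prKeys)

-- -------- generic list/dict facts --------

theorem pv_key_inj {α β : Type} (l : List (α × β)) (hnd : (l.map (·.1)).Nodup)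
    {x y : α × β} (hx : x ∈ l) (hy : y ∈ l) (h : x.1 = y.1) : x = y := by
  induction l with
  | nil => simp at hx
  | cons a t ih =>
    rw [List.map_cons, List.nodup_cons] at hnd
    obtain ⟨hna, hnt⟩ := hnd
    rcases List.mem_cons.mp hx with rfl | hx'
    · rcases List.mem_cons.mp hy with rfl | hy'
      · rfl
      · exact absurd (List.mem_map.mpr ⟨y, hy', h.symm⟩) hna
    · rcases List.mem_cons.mp hy with rfl | hy'
      · exact absurd (List.mem_map.mpr ⟨x, hx', h⟩) hna
      · exact ih hnt hx' hy' 

theorem pv_filter_map_snd {α β : Type} (l : List (α × β)) (p : β → Bool) :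
    (l.map (·.2)).filter p = (l.filter (fun kv => p kv.2)).map (·.2) := by
  induction l with
  | nil => rfl
  | cons a t ih => by_cases h : p a.2 <;> simp [h, ih]

theorem pv_popA_eq_erase {κ ν : Type} [BEq κ] [LawfulBEq κ] (m : PySem.Dict κ ν) (k : κ) :
    (((m.pop? k).map (·.2)).getD m) = m.erase k := by
  cases h : m.get? k with
  | none =>
    have hf : m.items.find? (fun p => p.1 == k) = none := by
      unfold PySem.Dict.get? at h
      exact Option.map_eq_none_iff.mp h
    simp only [PySem.Dict.pop?, h, Option.map_none, Option.getD_none]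
    apply PySem.Dict.ext
    show m.items = m.items.filter _
    rw [eq_comm, List.filter_eq_self]
    intro p hp
    simpa using List.find?_eq_none.mp hf p hp
  | some v => simp [PySem.Dict.pop?, h]

theorem pv_foldl_erase_items {κ ν : Type} [BEq κ] [LawfulBEq κ] (ks : List κ) (m : PySem.Dict κ ν) :
    (ks.foldl (fun m k => m.erase k) m).items
      = m.items.filter (fun kv => !ks.contains kv.1) := by
  induction ks generalizing m with
  | nil => simp
  | cons k ks ih =>
    simp only [List.foldl_cons]
    rw [ih]
    show (m.erase k).items.filter _ = _
    simp only [PySem.Dict.erase, List.filter_filter]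
    apply List.filter_congr
    intro kv _
    simp [Bool.not_or, Bool.and_comm]

theorem pv_ofList_items_of_nodup {κ ν : Type} [BEq κ] [LawfulBEq κ]
    (l : List (κ × ν)) (h : (l.map (·.1)).Nodup) : (PySem.Dict.ofList l).items = l := by
  unfold PySem.Dict.ofList PySem.Dict.update
  rw [PySem.Dict.items_foldl_insert_fresh l (·.1) (·.2) PySem.Dict.empty
    (by intro a _; simp [PySem.Dict.contains_empty]) h]
  simp [PySem.Dict.empty]

-- -------- facts about the two merge helpers --------

theorem pv_overlap_iff (dh k : List Int) : pvOverlap dh k = true ↔ ∃ x ∈ dh, x ∈ k := by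
  unfold pvOverlap PySem.Set.inter
  rw [Bool.not_eq_eq_eq_not, Bool.not_true, List.isEmpty_eq_false_iff, Ne, List.filter_eq_nil_iff]
  push Not
  constructor
  · rintro ⟨x, hx, hc⟩
    exact ⟨x, (PySem.Set.mem_ofList _ _).mp hx,
      (PySem.Set.mem_ofList _ _).mp ((PySem.Set.contains_iff _ _).mp (by simpa using hc))⟩
  · rintro ⟨x, hx, hk⟩
    exact ⟨x, (PySem.Set.mem_ofList _ _).mpr hx,
      by simpa using (PySem.Set.contains_iff _ _).mpr ((PySem.Set.mem_ofList _ _).mpr hk)⟩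

theorem pv_dedup_fold_mem (b : List Int) :
    ∀ (p : List Int × PySem.Set Int), (∀ x, x ∈ p.2 ↔ x ∈ p.1) →
    ∀ x, (x ∈ (b.foldl (fun (p : List Int × PySem.Set Int) x =>
        if PySem.Set.contains p.2 x then p else (p.1 ++ [x], PySem.Set.add p.2 x)) p).1
      ↔ x ∈ p.1 ∨ x ∈ b) := by
  induction b with
  | nil => simp
  | cons y b ih =>
    intro p hp x
    simp only [List.foldl_cons]
    by_cases hy : y ∈ p.1
    · have hc : PySem.Set.contains p.2 y = true := by
        rw [PySem.Set.contains_iff]; exact (hp y).mpr hy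
      rw [if_pos hc, ih p hp x]
      simp only [List.mem_cons]
      constructor
      · rintro (h | h)
        · exact Or.inl h
        · exact Or.inr (Or.inr h)
      · rintro (h | rfl | h)
        · exact Or.inl h
        · exact Or.inl hy
        · exact Or.inr h
    · have hc : ¬ (PySem.Set.contains p.2 y = true) := by
        rw [PySem.Set.contains_iff]; intro hm; exact hy ((hp y).mp hm)
      rw [if_neg hc, ih (p.1 ++ [y], PySem.Set.add p.2 y)
        (by intro z; rw [PySem.Set.mem_add]; simp [hp z, or_comm]) x]
      simp only [List.mem_append, List.mem_cons]
      tauto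

theorem pv_filter_fold (a : List Int) (c : Int → Bool) :
    ∀ (u0 : List Int), a.foldl (fun u item => if c item then u else u ++ [item]) u0
      = u0 ++ a.filter (fun x => !c x) := by
  induction a with
  | nil => simp
  | cons y a ih =>
    intro u0
    by_cases h : c y <;> simp [h, ih]

theorem pv_mergeA_mem (a b : List Int) (x : Int) :
    x ∈ pvMergeHandles a b ↔ x ∈ a ∨ x ∈ b := by
  unfold pvMergeHandles
  simp only [pv_filter_fold, List.nil_append]
  rw [pv_dedup_fold_mem b _ (by intro z; simpa using PySem.Set.mem_ofList z _) x]
  simp only [List.mem_filter, Bool.not_eq_eq_eq_not, Bool.not_true,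
    ← Bool.not_eq_true, PySem.Set.contains_iff]
  constructor
  · rintro (⟨ha, _⟩ | hb)
    · exact Or.inl ha
    · exact Or.inr hb
  · rintro (ha | hb)
    · by_cases hb' : x ∈ b
      · exact Or.inr hb'
      · exact Or.inl ⟨ha, by simpa [PySem.Set.mem_ofList] using hb'⟩
    · exact Or.inr hb

theorem pv_mergeAlt_eq (a b : List Int) : pvMergeHandlesAlt a b = pvMergeHandles a b := by
  unfold pvMergeHandlesAlt pvMergeHandles
  simp only [pv_filter_fold, List.nil_append]

theorem pv_absorbB_eq (iid : Int) : pvAbsorbB iid = pvAbsorbA iid := by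
  funext p kv
  unfold pvAbsorbB pvAbsorbA
  rw [pv_mergeAlt_eq, pv_mergeAlt_eq]

theorem pv_absorb_fold_mem (iid : Int) (L : List (List Int × (Int × Int))) :
    ∀ (p : List Int × (Int × Int)) (x : Int),
      x ∈ (L.foldl (pvAbsorbA iid) p).1 ↔ x ∈ p.1 ∨ ∃ kv ∈ L, x ∈ kv.1 := by
  induction L with
  | nil => simp
  | cons kv L ih =>
    intro p x
    rw [List.foldl_cons, ih]
    have hstep : x ∈ (pvAbsorbA iid p kv).1 ↔ x ∈ p.1 ∨ x ∈ kv.1 := by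
      unfold pvAbsorbA
      split_ifs <;> simp [pv_mergeA_mem] <;> tauto
    rw [hstep]
    simp only [List.mem_cons]
    constructor
    · rintro ((h | h) | ⟨kv', h1, h2⟩)
      · exact Or.inl h
      · exact Or.inr ⟨kv, Or.inl rfl, h⟩
      · exact Or.inr ⟨kv', Or.inr h1, h2⟩
    · rintro (h | ⟨kv', (rfl | h1), h2⟩)
      · exact Or.inl (Or.inl h)
      · exact Or.inl (Or.inr h2)
      · exact Or.inr ⟨kv', h1, h2⟩

-- -------- A's inner scan --------

theorem pv_scanA (dh : List Int) (iid : Int) (items : List (List Int × (Int × Int))) :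
    ∀ (p : List Int × (Int × Int)) (acc : List (List Int)),
    items.foldl
      (fun (st : (List Int × (Int × Int)) × List (List Int)) ex =>
        if pvOverlap dh ex.1 then
          (if ex.2.1 < iid then
            ((pvMergeHandles ex.1 st.1.1, st.1.2), st.2 ++ [ex.1])
          else
            ((pvMergeHandles st.1.1 ex.1, ex.2), st.2 ++ [ex.1]))
        else st) (p, acc)
    = ((items.filter (fun kv => pvOverlap dh kv.1)).foldl (pvAbsorbA iid) p,
       acc ++ ((items.filter (fun kv => pvOverlap dh kv.1)).map (·.1))) := by
  induction items with
  | nil => simp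
  | cons kv items ih =>
    intro p acc
    simp only [List.foldl_cons]
    by_cases h : pvOverlap dh kv.1 = true
    · by_cases h2 : kv.2.1 < iid
      · simp only [h, ite_true, if_pos h2, ih]
        simp [pvAbsorbA, h, h2]
      · simp only [h, ite_true, if_neg h2, ih]
        simp [pvAbsorbA, h, h2]
    · simp only [h, ih]
      simp [h]

-- -------- B's hit set, pop loop and index update --------

theorem pv_hit_fold (dh : List Int) (index : PySem.Dict Int Int) :
    ∀ (s : PySem.Set Int), s.Nodup →
    ((dh.foldl (fun (h : PySem.Set Int) e =>
        match index.get? e with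
        | some g => PySem.Set.add h g
        | none => h) s).Nodup
    ∧ ∀ g, g ∈ (dh.foldl (fun (h : PySem.Set Int) e =>
        match index.get? e with
        | some g => PySem.Set.add h g
        | none => h) s) ↔ g ∈ s ∨ ∃ e ∈ dh, index.get? e = some g) := by
  induction dh with
  | nil => intro s hs; exact ⟨hs, by simp⟩
  | cons e dh ih =>
    intro s hs
    cases h : index.get? e with
    | none =>
      obtain ⟨h1, h2⟩ := ih s hs
      refine ⟨by simpa [h] using h1, ?_⟩
      intro g
      rw [show (((e :: dh).foldl (fun (h : PySem.Set Int) e =>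
          match index.get? e with
          | some g => PySem.Set.add h g
          | none => h) s)) = ((dh.foldl (fun (h : PySem.Set Int) e =>
          match index.get? e with
          | some g => PySem.Set.add h g
          | none => h) s)) from by simp [h]]
      rw [h2 g]
      simp only [List.mem_cons]
      constructor
      · rintro (hg | ⟨e', he', hg⟩)
        · exact Or.inl hg
        · exact Or.inr ⟨e', Or.inr he', hg⟩
      · rintro (hg | ⟨e', (rfl | he'), hg⟩)
        · exact Or.inl hg
        · rw [h] at hg; cases hg
        · exact Or.inr ⟨e', he', hg⟩
    | some g0 =>
      obtain ⟨h1, h2⟩ := ih (PySem.Set.add s g0) (PySem.Set.nodup_add s g0 hs)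
      refine ⟨by simpa [h] using h1, ?_⟩
      intro g
      rw [show (((e :: dh).foldl (fun (h : PySem.Set Int) e =>
          match index.get? e with
          | some g => PySem.Set.add h g
          | none => h) s)) = ((dh.foldl (fun (h : PySem.Set Int) e =>
          match index.get? e with
          | some g => PySem.Set.add h g
          | none => h) (PySem.Set.add s g0))) from by simp [h]]
      rw [h2 g, PySem.Set.mem_add]
      simp only [List.mem_cons]
      constructor
      · rintro ((hg | rfl) | ⟨e', he', hg⟩)
        · exact Or.inl hg
        · exact Or.inr ⟨e, Or.inl rfl, h⟩
        · exact Or.inr ⟨e', Or.inr he', hg⟩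
      · rintro (hg | ⟨e', (rfl | he'), hg⟩)
        · exact Or.inl (Or.inl hg)
        · rw [h] at hg
          exact Or.inl (Or.inr (Option.some.inj hg).symm)
        · exact Or.inr ⟨e', he', hg⟩

theorem pv_popB_fold (iid : Int) (L : List (Int × (List Int × (Int × Int)))) :
    ∀ (groups : PySem.Dict Int (List Int × (Int × Int))) (p : List Int × (Int × Int)),
    groups.keys.Nodup → L.Sublist groups.items →
    (L.map (·.1)).foldl
      (fun (p : (List Int × (Int × Int)) × PySem.Dict Int (List Int × (Int × Int))) g =>
        match p.2.pop? g with
        | some (kv, rest) =>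
          (if kv.2.1 < iid then
            ((pvMergeHandlesAlt kv.1 p.1.1, p.1.2), rest)
          else
            ((pvMergeHandlesAlt p.1.1 kv.1, kv.2), rest))
        | none => p) (p, groups)
    = (L.foldl (fun p kv => pvAbsorbB iid p kv.2) p,
       PySem.Dict.mk (groups.items.filter (fun kv => !(L.map (·.1)).contains kv.1))) := by
  induction L with
  | nil =>
    intro groups p hnd hsub
    simp only [List.map_nil, List.foldl_nil]
    refine Prod.ext_iff.mpr ⟨rfl, ?_⟩
    apply PySem.Dict.ext
    show groups.items = _
    simp
  | cons a L ih =>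
    intro groups p hnd hsub
    have hitems_nd : groups.items.Nodup := List.Nodup.of_map _ hnd
    have hmem : a ∈ groups.items := hsub.subset (List.mem_cons_self)
    have hget : groups.get? a.1 = some a.2 :=
      PySem.Dict.get?_of_mem_items groups (by simpa using hmem) hnd
    have hpop : groups.pop? a.1 = some (a.2, groups.erase a.1) := by
      unfold PySem.Dict.pop?
      rw [hget]
      rfl
    have hLkeys : ∀ kv ∈ L, (!(kv.1 == a.1)) = true := by
      intro kv hkv
      have h1 : kv ∈ groups.items := hsub.subset (List.mem_cons_of_mem _ hkv)
      have hna : a ∉ L := (List.nodup_cons.mp (List.Nodup.sublist hsub hitems_nd)).1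
      have hne : kv ≠ a := fun hh => hna (hh ▸ hkv)
      have : kv.1 ≠ a.1 := fun hh => hne (pv_key_inj groups.items hnd h1 hmem hh)
      simpa using this
    have hLsub : L.Sublist (groups.erase a.1).items := by
      show L.Sublist (groups.items.filter _)
      have h3 := List.Sublist.filter (fun kv => !(kv.1 == a.1))
        ((List.sublist_cons_self a L).trans hsub)
      rwa [List.filter_eq_self.mpr hLkeys] at h3
    have hend : (groups.erase a.1).keys.Nodup := by
      simp only [PySem.Dict.keys, PySem.Dict.erase]
      exact List.Nodup.sublist (List.Sublist.map _ List.filter_sublist) hnd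
    simp only [List.map_cons, List.foldl_cons, hpop]
    by_cases h2 : a.2.2.1 < iid
    · rw [if_pos h2, ih (groups.erase a.1) _ hend hLsub]
      refine Prod.ext_iff.mpr ⟨?_, ?_⟩
      · simp [pvAbsorbB, h2]
      · apply PySem.Dict.ext
        show (groups.erase a.1).items.filter _ = _
        simp only [PySem.Dict.erase, List.filter_filter]
        apply List.filter_congr
        intro kv _
        simp [Bool.not_or, Bool.and_comm]
    · rw [if_neg h2, ih (groups.erase a.1) _ hend hLsub]
      refine Prod.ext_iff.mpr ⟨?_, ?_⟩
      · simp [pvAbsorbB, h2]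
      · apply PySem.Dict.ext
        show (groups.erase a.1).items.filter _ = _
        simp only [PySem.Dict.erase, List.filter_filter]
        apply List.filter_congr
        intro kv _
        simp [Bool.not_or, Bool.and_comm]

theorem pv_index_update (key : List Int) :
    ∀ (ix : PySem.Dict Int Int) (n e : Int),
    (key.foldl (fun ix e => ix.insert e n) ix).get? e
      = if e ∈ key then some n else ix.get? e := by
  induction key with
  | nil => simp
  | cons k ks ih =>
    intro ix n e
    rw [List.foldl_cons, ih]
    by_cases hk : e ∈ ks
    · simp [hk]
    · by_cases he : e = k
      · simp [hk, he, PySem.Dict.get?_insert]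
      · simp [hk, he, PySem.Dict.get?_insert]

-- -------- characterizing one step of A --------

theorem pv_curr_disj (merged : PySem.Dict (List Int) (Int × Int)) (entry : List Int × Int × Int)
    (h6 : List.Pairwise (fun kv kv' => ∀ x, x ∈ kv.1 → x ∉ kv'.1) merged.items) :
    ∀ kv ∈ merged.items, pvOverlap entry.1 kv.1 = false →
      ∀ x ∈ kv.1, x ∉ ((merged.items.filter (fun kv => pvOverlap entry.1 kv.1)).foldl
        (pvAbsorbA entry.2.1) (entry.1, entry.2)).1 := by
  intro kv hkv hPf x hx hxc
  rcases (pv_absorb_fold_mem entry.2.1 _ (entry.1, entry.2) x).mp hxc with hxd | ⟨kv', hkv', hx'⟩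
  · have : pvOverlap entry.1 kv.1 = true := (pv_overlap_iff _ _).mpr ⟨x, hxd, hx⟩
    rw [this] at hPf; cases hPf
  · have hkv'm : kv' ∈ merged.items := (List.mem_filter.mp hkv').1
    have hPkv' : pvOverlap entry.1 kv'.1 = true := (List.mem_filter.mp hkv').2
    have hne : kv ≠ kv' := by
      intro h
      rw [h, hPkv'] at hPf
      cases hPf
    have hsym : Symmetric (fun (kv kv' : List Int × (Int × Int)) => ∀ x, x ∈ kv.1 → x ∉ kv'.1) := by
      intro a b hab y hya hyb
      exact hab y hyb hya
    exact (List.Pairwise.forall hsym h6 hkv hkv'm hne) x hx hx'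

theorem pv_curr_fresh (merged : PySem.Dict (List Int) (Int × Int)) (entry : List Int × Int × Int)
    (h6 : List.Pairwise (fun kv kv' => ∀ x, x ∈ kv.1 → x ∉ kv'.1) merged.items)
    (hnil : ∀ kv ∈ merged.items, kv.1 = [] → entry.1 ≠ []) :
    ∀ kv ∈ merged.items, pvOverlap entry.1 kv.1 = false →
      kv.1 ≠ ((merged.items.filter (fun kv => pvOverlap entry.1 kv.1)).foldl
        (pvAbsorbA entry.2.1) (entry.1, entry.2)).1 := by
  intro kv hkvm hPf hkeq
  by_cases hc : ((merged.items.filter (fun kv => pvOverlap entry.1 kv.1)).foldl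
      (pvAbsorbA entry.2.1) (entry.1, entry.2)).1 = []
  · have hknil : kv.1 = [] := by rw [hkeq, hc]
    have hdnil : entry.1 = [] := by
      cases hE : entry.1 with
      | nil => rfl
      | cons y ys =>
        have hy : y ∈ ((merged.items.filter (fun kv => pvOverlap entry.1 kv.1)).foldl
            (pvAbsorbA entry.2.1) (entry.1, entry.2)).1 :=
          (pv_absorb_fold_mem entry.2.1 _ (entry.1, entry.2) y).mpr
            (Or.inl (by rw [hE]; exact List.mem_cons_self))
        rw [hc] at hy
        cases hy
    exact hnil kv hkvm hknil hdnil
  · obtain ⟨x, hx⟩ := List.exists_mem_of_ne_nil _ hc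
    exact pv_curr_disj merged entry h6 kv hkvm hPf x (hkeq ▸ hx) hx

theorem pv_stepA_items (merged : PySem.Dict (List Int) (Int × Int)) (entry : List Int × Int × Int)
    (h5 : merged.keys.Nodup)
    (h6 : List.Pairwise (fun kv kv' => ∀ x, x ∈ kv.1 → x ∉ kv'.1) merged.items)
    (hnil : ∀ kv ∈ merged.items, kv.1 = [] → entry.1 ≠ []) :
    (pvStepA merged entry).items
      = merged.items.filter (fun kv => !pvOverlap entry.1 kv.1)
        ++ [(merged.items.filter (fun kv => pvOverlap entry.1 kv.1)).foldl
              (pvAbsorbA entry.2.1) (entry.1, entry.2)] := by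
  have h5' : (merged.items.map (·.1)).Nodup := h5
  have hcurr_mem : ∀ x, x ∈ ((merged.items.filter (fun kv => pvOverlap entry.1 kv.1)).foldl
      (pvAbsorbA entry.2.1) (entry.1, entry.2)).1
      ↔ x ∈ entry.1 ∨ ∃ kv ∈ merged.items.filter (fun kv => pvOverlap entry.1 kv.1), x ∈ kv.1 := by
    intro x
    exact pv_absorb_fold_mem entry.2.1 _ (entry.1, entry.2) x
  have hdisj := pv_curr_disj merged entry h6
  have hfilter_eq : merged.items.filter
        (fun kv => !((merged.items.filter (fun kv => pvOverlap entry.1 kv.1)).map (·.1)).contains kv.1)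
      = merged.items.filter (fun kv => !pvOverlap entry.1 kv.1) := by
    apply List.filter_congr
    intro kv hkv
    congr 1
    have hiff : kv.1 ∈ (merged.items.filter (fun kv => pvOverlap entry.1 kv.1)).map (·.1)
        ↔ pvOverlap entry.1 kv.1 = true := by
      constructor
      · rintro hm
        obtain ⟨kv', hkv', hkeq⟩ := List.mem_map.mp hm
        obtain ⟨hkv'm, hP'⟩ := List.mem_filter.mp hkv'
        have : kv' = kv := pv_key_inj merged.items h5' hkv'm hkv hkeq
        rw [← this]
        exact hP'
      · intro hP
        exact List.mem_map.mpr ⟨kv, List.mem_filter.mpr ⟨hkv, hP⟩, rfl⟩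
    cases hb : pvOverlap entry.1 kv.1 with
    | true =>
      have := hiff.mpr hb
      simpa [List.contains_iff_mem] using this
    | false =>
      have : kv.1 ∉ (merged.items.filter (fun kv => pvOverlap entry.1 kv.1)).map (·.1) := by
        intro hm
        rw [hiff.mp hm] at hb
        cases hb
      simpa [List.contains_iff_mem] using this
  have hfresh_key := pv_curr_fresh merged entry h6 hnil
  unfold pvStepA
  dsimp only
  rw [pv_scanA entry.1 entry.2.1 merged.items (entry.1, entry.2) []]
  simp only [List.nil_append, pv_popA_eq_erase]
  rw [PySem.Dict.items_insert_of_not_contains]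
  · rw [pv_foldl_erase_items, hfilter_eq]
  · rw [PySem.Dict.contains_eq_decide_mem_keys]
    simp only [PySem.Dict.keys, pv_foldl_erase_items, hfilter_eq, decide_eq_false_iff_not]
    intro hm
    obtain ⟨kv, hkvf, hkeq⟩ := List.mem_map.mp hm
    obtain ⟨hkvm, hPn⟩ := List.mem_filter.mp hkvf
    exact hfresh_key kv hkvm (by simpa using hPn) hkeq

-- -------- characterizing one step of B --------

theorem pv_stepB_state (st : PySem.Dict Int (List Int × (Int × Int)) × PySem.Dict Int Int × Int)
    (entry : List Int × Int × Int)
    (h2 : List.Pairwise (· < ·) st.1.keys)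
    (h3 : ∀ g ∈ st.1.keys, g < st.2.2)
    (h4 : ∀ e g, st.2.1.get? e = some g ↔ ∃ kv ∈ st.1.items, kv.1 = g ∧ e ∈ kv.2.1) :
    pvStepB st entry =
      (PySem.Dict.mk ((st.1.items.filter (fun kv => !pvOverlap entry.1 kv.2.1))
          ++ [(st.2.2, (st.1.items.filter (fun kv => pvOverlap entry.1 kv.2.1)).foldl
                (fun p kv => pvAbsorbB entry.2.1 p kv.2) (entry.1, entry.2))]),
       ((st.1.items.filter (fun kv => pvOverlap entry.1 kv.2.1)).foldl
                (fun p kv => pvAbsorbB entry.2.1 p kv.2) (entry.1, entry.2)).1.foldl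
          (fun ix e => ix.insert e st.2.2) st.2.1,
       st.2.2 + 1) := by
  have hknd : st.1.keys.Nodup := List.Pairwise.imp (fun h => ne_of_lt h) h2
  have hknd' : (st.1.items.map (·.1)).Nodup := hknd
  have hys_pair : List.Pairwise (fun (a b : Int) => a < b)
      ((st.1.items.filter (fun kv => pvOverlap entry.1 kv.2.1)).map (·.1)) := by
    have hsub : ((st.1.items.filter (fun kv => pvOverlap entry.1 kv.2.1)).map (·.1)).Sublist
        (st.1.items.map (·.1)) := List.Sublist.map _ List.filter_sublist
    exact List.Pairwise.sublist hsub h2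
  have hys_nd : ((st.1.items.filter (fun kv => pvOverlap entry.1 kv.2.1)).map (·.1)).Nodup :=
    List.Pairwise.imp (fun h => ne_of_lt h) hys_pair
  obtain ⟨hnd_hit, hmem_hit⟩ := pv_hit_fold entry.1 st.2.1 [] List.nodup_nil
  have hsorted : PySem.List.sorted (entry.1.foldl (fun (h : PySem.Set Int) e =>
      match st.2.1.get? e with
      | some g => PySem.Set.add h g
      | none => h) ([] : PySem.Set Int)) id
      = (st.1.items.filter (fun kv => pvOverlap entry.1 kv.2.1)).map (·.1) := by
    apply PySem.List.sorted_eq_of_perm_of_pairwise_lt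
    · rw [List.perm_ext_iff_of_nodup hys_nd hnd_hit]
      intro g
      rw [hmem_hit g]
      simp only [List.mem_map, List.mem_filter, List.not_mem_nil, false_or]
      constructor
      · rintro ⟨kv, ⟨hkv, hP⟩, rfl⟩
        obtain ⟨e, he, hek⟩ := (pv_overlap_iff _ _).mp hP
        exact ⟨e, he, (h4 e kv.1).mpr ⟨kv, hkv, rfl, hek⟩⟩
      · rintro ⟨e, he, hg⟩
        obtain ⟨kv, hkv, hkg, hek⟩ := (h4 e g).mp hg
        exact ⟨kv, ⟨hkv, (pv_overlap_iff _ _).mpr ⟨e, he, hek⟩⟩, hkg⟩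
    · exact hys_pair
  have hfilter_eq : st.1.items.filter
        (fun kv => !((st.1.items.filter (fun kv => pvOverlap entry.1 kv.2.1)).map (·.1)).contains kv.1)
      = st.1.items.filter (fun kv => !pvOverlap entry.1 kv.2.1) := by
    apply List.filter_congr
    intro kv hkv
    congr 1
    have hiff : kv.1 ∈ (st.1.items.filter (fun kv => pvOverlap entry.1 kv.2.1)).map (·.1)
        ↔ pvOverlap entry.1 kv.2.1 = true := by
      constructor
      · intro hm
        obtain ⟨kv', hkv', hkeq⟩ := List.mem_map.mp hm
        obtain ⟨hkv'm, hP'⟩ := List.mem_filter.mp hkv'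
        have : kv' = kv := pv_key_inj st.1.items hknd' hkv'm hkv hkeq
        rw [← this]
        exact hP'
      · intro hP
        exact List.mem_map.mpr ⟨kv, List.mem_filter.mpr ⟨hkv, hP⟩, rfl⟩
    cases hb : pvOverlap entry.1 kv.2.1 with
    | true => simpa [List.contains_iff_mem] using hiff.mpr hb
    | false =>
      have : kv.1 ∉ (st.1.items.filter (fun kv => pvOverlap entry.1 kv.2.1)).map (·.1) := by
        intro hm
        rw [hiff.mp hm] at hb
        cases hb
      simpa [List.contains_iff_mem] using this
  unfold pvStepB
  dsimp only
  rw [hsorted,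
    pv_popB_fold entry.2.1 (st.1.items.filter (fun kv => pvOverlap entry.1 kv.2.1)) st.1
      (entry.1, entry.2) hknd List.filter_sublist]
  refine Prod.ext_iff.mpr ⟨?_, rfl⟩
  apply PySem.Dict.ext
  rw [PySem.Dict.items_insert_of_not_contains]
  · show _ ++ _ = _
    rw [hfilter_eq]
  · rw [PySem.Dict.contains_eq_decide_mem_keys]
    simp only [PySem.Dict.keys, hfilter_eq, decide_eq_false_iff_not]
    intro hm
    obtain ⟨kv, hkvf, hkeq⟩ := List.mem_map.mp hm
    have hlt : kv.1 < st.2.2 := h3 kv.1 (List.mem_map.mpr ⟨kv, (List.mem_filter.mp hkvf).1, rfl⟩)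
    rw [hkeq] at hlt
    exact lt_irrefl _ hlt

-- -------- the invariant is preserved by one step --------

theorem pv_step_inv (prKeys : List (List Int)) (merged : PySem.Dict (List Int) (Int × Int))
    (st : PySem.Dict Int (List Int × (Int × Int)) × PySem.Dict Int Int × Int)
    (entry : List Int × Int × Int)
    (hInv : pvInv prKeys merged st) (hfresh : entry.1 ∉ prKeys) :
    pvInv (prKeys ++ [entry.1]) (pvStepA merged entry) (pvStepB st entry) := by
  obtain ⟨h1, h2, h3, h4, h5, h6, h7, h8⟩ := hInv
  have h5' : (merged.items.map (·.1)).Nodup := h5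
  have hnil : ∀ kv ∈ merged.items, kv.1 = [] → entry.1 ≠ [] := by
    intro kv hkv hk hE
    exact hfresh (by rw [hE]; exact h8 kv hkv hk)
  have hval : merged.items = st.1.items.map (·.2) := h1
  have hA := pv_stepA_items merged entry h5 h6 hnil
  have hB := pv_stepB_state st entry h2 h3 h4
  have hovlAB : merged.items.filter (fun kv => pvOverlap entry.1 kv.1)
      = (st.1.items.filter (fun kv => pvOverlap entry.1 kv.2.1)).map (·.2) := by
    rw [hval, pv_filter_map_snd]
  have hkeepAB : merged.items.filter (fun kv => !pvOverlap entry.1 kv.1)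
      = (st.1.items.filter (fun kv => !pvOverlap entry.1 kv.2.1)).map (·.2) := by
    rw [hval, pv_filter_map_snd]
  have hcurrAB : (st.1.items.filter (fun kv => pvOverlap entry.1 kv.2.1)).foldl
        (fun p kv => pvAbsorbB entry.2.1 p kv.2) (entry.1, entry.2)
      = (merged.items.filter (fun kv => pvOverlap entry.1 kv.1)).foldl
        (pvAbsorbA entry.2.1) (entry.1, entry.2) := by
    rw [hovlAB, List.foldl_map]
    simp only [pv_absorbB_eq]
  rw [hcurrAB] at hB
  have hcurr_mem := fun x => pv_absorb_fold_mem entry.2.1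
      (merged.items.filter (fun kv => pvOverlap entry.1 kv.1)) (entry.1, entry.2) x
  have hdisj := pv_curr_disj merged entry h6
  have hkfresh := pv_curr_fresh merged entry h6 hnil
  have hdh_curr : ∀ x ∈ entry.1,
      x ∈ ((merged.items.filter (fun kv => pvOverlap entry.1 kv.1)).foldl
        (pvAbsorbA entry.2.1) (entry.1, entry.2)).1 :=
    fun x hx => (hcurr_mem x).mpr (Or.inl hx)
  have hBpair : List.Pairwise
      (fun (kv kv' : Int × (List Int × (Int × Int))) => ∀ x, x ∈ kv.2.1 → x ∉ kv'.2.1)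
      st.1.items := by
    rw [hval] at h6
    exact (List.pairwise_map).mp h6
  set curr := (merged.items.filter (fun kv => pvOverlap entry.1 kv.1)).foldl
      (pvAbsorbA entry.2.1) (entry.1, entry.2) with hcurrdef
  unfold pvInv
  refine ⟨?_, ?_, ?_, ?_, ?_, ?_, ?_, ?_⟩
  · -- (1) items = values
    rw [hA, hB]
    show _ = PySem.Dict.values _
    simp [PySem.Dict.values, hkeepAB]
  · -- (2) group ids strictly increasing
    rw [hB]
    show List.Pairwise _ (PySem.Dict.keys _)
    simp only [PySem.Dict.keys]
    rw [List.map_append, List.pairwise_append]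
    refine ⟨List.Pairwise.sublist (List.Sublist.map _ List.filter_sublist) h2, by simp, ?_⟩
    intro a ha b hb
    simp only [List.map_cons, List.map_nil, List.mem_singleton] at hb
    subst hb
    obtain ⟨kv, hkvf, rfl⟩ := List.mem_map.mp ha
    exact h3 kv.1 (List.mem_map.mpr ⟨kv, (List.mem_filter.mp hkvf).1, rfl⟩)
  · -- (3) ids bounded by next gid
    rw [hB]
    intro g hg
    show g < st.2.2 + 1
    simp only [PySem.Dict.keys] at hg
    rw [List.map_append, List.mem_append] at hg
    rcases hg with hg | hg
    · obtain ⟨kv, hkvf, rfl⟩ := List.mem_map.mp hg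
      have := h3 kv.1 (List.mem_map.mpr ⟨kv, (List.mem_filter.mp hkvf).1, rfl⟩)
      omega
    · simp only [List.map_cons, List.map_nil, List.mem_singleton] at hg
      omega
  · -- (4) the index points at the group containing each element
    rw [hB]
    intro e g
    show (curr.1.foldl (fun ix e => ix.insert e st.2.2) st.2.1).get? e = some g ↔ _
    rw [pv_index_update]
    by_cases he : e ∈ curr.1
    · rw [if_pos he]
      constructor
      · intro hsome
        have hg : g = st.2.2 := (Option.some.inj hsome).symm
        subst hg
        exact ⟨(st.2.2, curr), List.mem_append.mpr (Or.inr (List.mem_singleton.mpr rfl)), rfl, he⟩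
      · rintro ⟨kv, hkvm, hkg, hekv⟩
        rcases List.mem_append.mp hkvm with hkeep | hone
        · exfalso
          obtain ⟨hkvi, hPn⟩ := List.mem_filter.mp hkeep
          have hPf : pvOverlap entry.1 kv.2.1 = false := by simpa using hPn
          rcases (hcurr_mem e).mp he with hed | ⟨kv', hkv', hek'⟩
          · have : pvOverlap entry.1 kv.2.1 = true := (pv_overlap_iff _ _).mpr ⟨e, hed, hekv⟩
            rw [this] at hPf
            cases hPf
          · rw [hovlAB] at hkv'
            obtain ⟨kvb, hkvbf, rfl⟩ := List.mem_map.mp hkv'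
            obtain ⟨hkvbi, hPb⟩ := List.mem_filter.mp hkvbf
            have hne : kv ≠ kvb := by
              intro hEq
              rw [hEq, hPb] at hPf
              cases hPf
            have hsym : Symmetric
                (fun (kv kv' : Int × (List Int × (Int × Int))) => ∀ x, x ∈ kv.2.1 → x ∉ kv'.2.1) :=
              fun a b hab y hya hyb => hab y hyb hya
            exact (List.Pairwise.forall hsym hBpair hkvi hkvbi hne) e hekv hek'
        · rw [List.mem_singleton.mp hone] at hkg
          rw [← hkg]
    · rw [if_neg he, h4 e g]
      constructor
      · rintro ⟨kv, hkvi, hkg, hekv⟩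
        have hPf : pvOverlap entry.1 kv.2.1 = false := by
          cases hb : pvOverlap entry.1 kv.2.1
          · rfl
          · exfalso
            have hkvb : kv ∈ st.1.items.filter (fun kv => pvOverlap entry.1 kv.2.1) :=
              List.mem_filter.mpr ⟨hkvi, hb⟩
            exact he ((hcurr_mem e).mpr (Or.inr ⟨kv.2,
              by rw [hovlAB]; exact List.mem_map.mpr ⟨kv, hkvb, rfl⟩, hekv⟩))
        exact ⟨kv, List.mem_append.mpr (Or.inl (List.mem_filter.mpr ⟨hkvi, by simp [hPf]⟩)),
          hkg, hekv⟩
      · rintro ⟨kv, hkvm, hkg, hekv⟩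
        rcases List.mem_append.mp hkvm with hkeep | hone
        · exact ⟨kv, (List.mem_filter.mp hkeep).1, hkg, hekv⟩
        · exfalso
          rw [List.mem_singleton.mp hone] at hekv
          exact he hekv
  · -- (5) merged keys distinct
    show ((pvStepA merged entry).items.map (·.1)).Nodup
    rw [hA, List.map_append]
    refine List.Nodup.append
      (List.Nodup.sublist (List.Sublist.map _ List.filter_sublist) h5') (by simp) ?_
    intro a ha hb
    simp only [List.map_cons, List.map_nil, List.mem_singleton] at hb
    subst hb
    obtain ⟨kv, hkvf, hkeq⟩ := List.mem_map.mp ha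
    obtain ⟨hkvi, hPn⟩ := List.mem_filter.mp hkvf
    exact hkfresh kv hkvi (by simpa using hPn) hkeq
  · -- (6) merged keys pairwise disjoint
    rw [hA, List.pairwise_append]
    refine ⟨List.Pairwise.sublist List.filter_sublist h6, by simp, ?_⟩
    intro kv hkv b hb
    rw [List.mem_singleton.mp hb]
    intro x hx
    obtain ⟨hkvi, hPn⟩ := List.mem_filter.mp hkv
    exact hdisj kv hkvi (by simpa using hPn) x hx
  · -- (7) element union grows by entry's handle
    intro x
    rw [hA]
    constructor
    · rintro ⟨kv, hkvm, hx⟩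
      rcases List.mem_append.mp hkvm with hkeep | hone
      · obtain ⟨k, hk, hxk⟩ := (h7 x).mp ⟨kv, (List.mem_filter.mp hkeep).1, hx⟩
        exact ⟨k, List.mem_append.mpr (Or.inl hk), hxk⟩
      · rw [List.mem_singleton.mp hone] at hx
        rcases (hcurr_mem x).mp hx with hxd | ⟨kv', hkv', hx'⟩
        · exact ⟨entry.1, List.mem_append.mpr (Or.inr (List.mem_singleton.mpr rfl)), hxd⟩
        · obtain ⟨k, hk, hxk⟩ := (h7 x).mp ⟨kv', (List.mem_filter.mp hkv').1, hx'⟩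
          exact ⟨k, List.mem_append.mpr (Or.inl hk), hxk⟩
    · rintro ⟨k, hk, hxk⟩
      rcases List.mem_append.mp hk with hkpr | hke
      · obtain ⟨kv, hkvi, hxkv⟩ := (h7 x).mpr ⟨k, hkpr, hxk⟩
        by_cases hP : pvOverlap entry.1 kv.1 = true
        · exact ⟨curr, List.mem_append.mpr (Or.inr (List.mem_singleton.mpr rfl)),
            (hcurr_mem x).mpr (Or.inr ⟨kv, List.mem_filter.mpr ⟨hkvi, hP⟩, hxkv⟩)⟩
        · exact ⟨kv, List.mem_append.mpr (Or.inl (List.mem_filter.mpr ⟨hkvi,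
            by simp [eq_false_of_ne_true hP]⟩)), hxkv⟩
      · rw [List.mem_singleton.mp hke] at hxk
        exact ⟨curr, List.mem_append.mpr (Or.inr (List.mem_singleton.mpr rfl)), hdh_curr x hxk⟩
  · -- (8) empty keys trace back to an input entry
    intro kv hkvm hknl
    rw [hA] at hkvm
    rcases List.mem_append.mp hkvm with hkeep | hone
    · exact List.mem_append.mpr (Or.inl (h8 kv (List.mem_filter.mp hkeep).1 hknl))
    · have hkc : kv = curr := List.mem_singleton.mp hone
      have hdnil : entry.1 = [] := by
        cases hE : entry.1 with
        | nil => rfl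
        | cons y ys =>
          have hy := hdh_curr y (by rw [hE]; exact List.mem_cons_self)
          rw [← hkc, hknl] at hy
          cases hy
      exact List.mem_append.mpr (Or.inr (List.mem_singleton.mpr hdnil.symm))

theorem pv_loop_inv (entries : List (List Int × (Int × Int))) :
    ∀ (prKeys : List (List Int)) merged st, pvInv prKeys merged st →
    (prKeys ++ entries.map (·.1)).Nodup →
    pvInv (prKeys ++ entries.map (·.1)) (entries.foldl pvStepA merged) (entries.foldl pvStepB st) := by
  induction entries with
  | nil =>
    intro prKeys merged st h _
    simpa using h
  | cons e es ih =>
    intro prKeys merged st h hnd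
    rw [List.map_cons] at hnd
    have hfresh : e.1 ∉ prKeys := by
      intro hmem
      exact (List.disjoint_of_nodup_append hnd) hmem List.mem_cons_self
    have hstep := pv_step_inv prKeys merged st e h hfresh
    have hnd2 : ((prKeys ++ [e.1]) ++ es.map (·.1)).Nodup := by
      rwa [← List.append_cons]
    have hres := ih (prKeys ++ [e.1]) (pvStepA merged e) (pvStepB st e) hstep hnd2
    rw [List.map_cons, List.append_cons]
    simpa using hres

theorem pv_inv_init : pvInv [] PySem.Dict.empty (PySem.Dict.empty, PySem.Dict.empty, 0) := by
  unfold pvInv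
  refine ⟨rfl, ?_, ?_, ?_, ?_, ?_, ?_, ?_⟩ <;>
    simp [PySem.Dict.empty, PySem.Dict.get?, PySem.Dict.keys, PySem.Dict.values]


-- ===== VERDICT (by name: the statement is the Claim_ definition above) =====
theorem merge_runtime_overlapping_debug_handles_spec : Claim_equal_merge_runtime_overlapping_debug_handles := by
  intro rio _hdom
  unfold Spec_merge_runtime_overlapping_debug_handles
  unfold merge_runtime_overlapping_debug_handles merge_runtime_overlapping_debug_handles_alt
  dsimp only
  have hknd : (PySem.Dict.ofList (κ := List Int) (ν := Int × Int) rio).keys.Nodup :=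
    PySem.Dict.nodup_keys_ofList rio
  obtain ⟨h1, h2, h3, h4, h5, h6, h7, h8⟩ :=
    pv_loop_inv (PySem.Dict.ofList rio).items [] PySem.Dict.empty
      (PySem.Dict.empty, PySem.Dict.empty, 0) pv_inv_init
      (by simp only [List.nil_append]; exact hknd)
  by_cases hsz : (PySem.Dict.ofList (κ := List Int) (ν := Int × Int) rio).size = 0
  · rw [if_pos hsz]
    have hit : (PySem.Dict.ofList (κ := List Int) (ν := Int × Int) rio).items = [] :=
      List.length_eq_zero_iff.mp hsz
    rw [hit]
    rfl
  · rw [if_neg hsz, h1]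
    exact (pv_ofList_items_of_nodup _ (by rw [← h1]; exact h5)).symm
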